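-- pv_equiv track=rewrite | github.com/roeinath/apkdiff | solve_class_matches_between_versions.py | solve_renaming
-- ===== SOURCE A (Python) =====
-- from typing import List, Tuple, Dict, Optional, Set
--
-- def remove_from_constraints(constraints: List[Tuple[List[str], List[str]]], lefts, rights):
--     """
--     Remove solved functions from constraints to simplify remaining problem.
--     lefts: functions from v1 that are already mapped
--     rights: functions from v2 that are already mapped
--     """
--     new_constraints = []
--     for left, right in constraints:
--         new_left = [l for l in left if l not in lefts]
--         new_right = [r for r in right if r not in rights]
--         if new_left or new_right:
--             new_constraints.append((new_left, new_right))
--     return new_constraints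
--
-- def solve_renaming(constraints: List[Tuple[List[str], List[str]]]):
--     """
--     Iterative solver that greedily resolves constraints with only one possibility.
--     Returns remaining constraints and solved mappings.
--     """
--     solution = {}
--     changed_last_round = True
--
--     while changed_last_round:
--         lefts, rights = set(), set()
--         changed_last_round = False
--
--         for constraint in constraints:
--             left, right = constraint
--             # If exactly one option in both sides, fix the mapping
--             if len(left) == 1 and len(right) == 1:
--                 solution[left[0]] = right[0]
--                 lefts.add(left[0])
--                 rights.add(right[0])
--                 changed_last_round = True
--
--         # Remove the solved functions from remaining constraints
--         constraints = remove_from_constraints(constraints, lefts, rights)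
--
--     return constraints, solution
-- ===== SOURCE B (Python) =====
-- def solve_renaming(constraints):
--     """
--     Worklist solver: index which constraints each name occurs in, then each
--     round solve the currently-(1,1) constraints and only revisit constraints
--     actually touched by a removal, instead of rescanning everything.
--     """
--     cons = [(list(left), list(right)) for left, right in constraints]
--     locc, rocc = {}, {}
--     for i, (left, right) in enumerate(cons):
--         for x in left:
--             locc.setdefault(x, []).append(i)
--         for x in right:
--             rocc.setdefault(x, []).append(i)
--     solution = {}
--     batch = [i for i in range(len(cons))
--              if len(cons[i][0]) == 1 and len(cons[i][1]) == 1]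
--     while batch:
--         lnames, rnames = [], []
--         for i in batch:
--             left, right = cons[i]
--             solution[left[0]] = right[0]
--             lnames.append(left[0])
--             rnames.append(right[0])
--         changed = set()
--         for x in lnames:
--             for j in locc.get(x, []):
--                 cons[j] = ([e for e in cons[j][0] if e != x], cons[j][1])
--                 changed.add(j)
--         for x in rnames:
--             for j in rocc.get(x, []):
--                 cons[j] = (cons[j][0], [e for e in cons[j][1] if e != x])
--                 changed.add(j)
--         batch = sorted(j for j in changed
--                        if len(cons[j][0]) == 1 and len(cons[j][1]) == 1)
--     remaining = [(l, r) for l, r in cons if l or r]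
--     return remaining, solution
-- ===== Notes on version B (the rewrite author's own statement) =====
-- stated objective: alternative
-- what changed: Replaces A's repeated full rescans (every round re-scans all constraints and rebuilds the whole constraint list) with a worklist: a name-to-constraint occurrence index built once, per round only the batch of currently-(1,1) constraints is solved and only constraints actually containing a solved name are updated and re-examined.
import Mathlib
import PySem

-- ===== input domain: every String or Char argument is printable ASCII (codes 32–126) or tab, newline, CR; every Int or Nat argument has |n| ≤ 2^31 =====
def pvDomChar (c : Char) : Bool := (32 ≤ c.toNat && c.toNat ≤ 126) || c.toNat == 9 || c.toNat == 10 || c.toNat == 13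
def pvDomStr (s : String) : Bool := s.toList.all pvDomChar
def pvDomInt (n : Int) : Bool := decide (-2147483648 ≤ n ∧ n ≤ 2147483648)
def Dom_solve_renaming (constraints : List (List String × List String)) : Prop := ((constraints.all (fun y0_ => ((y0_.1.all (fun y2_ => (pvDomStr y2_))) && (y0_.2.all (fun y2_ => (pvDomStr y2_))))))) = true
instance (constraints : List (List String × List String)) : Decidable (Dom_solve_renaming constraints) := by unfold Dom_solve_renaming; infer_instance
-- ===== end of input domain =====

-- B replaces A's per-round full rescan of all constraints by a worklist driven by a
-- name→constraint occurrence index (alternative algorithm, same exact result).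
-- Both loops carry a fuel argument (pvTotalSize + 1) purely as a totality guard:
-- every continuing round removes at least one element, so the fuel never runs out.

-- total number of name occurrences in the constraint list (fuel measure for both loops)
def pvTotalSize (cs : List (List String × List String)) : Nat :=
  (cs.map (fun c => c.1.length + c.2.length)).sum

-- ===== PORT A =====
def pvRemoveFromConstraints (cs : List (List String × List String))
    (lefts rights : PySem.Set String) : List (List String × List String) :=
  cs.foldl (fun acc c =>
    let nl := c.1.filter (fun l => !(lefts.contains l))
    let nr := c.2.filter (fun r => !(rights.contains r))
    if nl.isEmpty && nr.isEmpty then acc else acc ++ [(nl, nr)]) []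

-- one round's scan: solution updates, solved-name sets, changed flag
-- (headD "" is only reached under the length == 1 guard, so it is exact)
def pvScanA (cs : List (List String × List String)) (sol : PySem.Dict String String) :
    PySem.Dict String String × PySem.Set String × PySem.Set String × Bool :=
  cs.foldl (fun st c =>
    if c.1.length == 1 && c.2.length == 1 then
      (st.1.insert (c.1.headD "") (c.2.headD ""),
       PySem.Set.add st.2.1 (c.1.headD ""),
       PySem.Set.add st.2.2.1 (c.2.headD ""),
       true)
    else st)
    (sol, PySem.Set.empty, PySem.Set.empty, false)

def pvLoopA : Nat → List (List String × List String) → PySem.Dict String String →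
    (List (List String × List String)) × PySem.Dict String String
  | 0, cs, sol => (cs, sol)
  | f + 1, cs, sol =>
    let r := pvScanA cs sol
    let cs' := pvRemoveFromConstraints cs r.2.1 r.2.2.1
    if r.2.2.2 then pvLoopA f cs' r.1 else (cs', r.1)

def solve_renaming (constraints : List (List String × List String)) :
    (List (List String × List String)) × (List (String × String)) :=
  let r := pvLoopA (pvTotalSize constraints + 1) constraints PySem.Dict.empty
  (r.1, r.2.items)

-- ===== PORT B =====
def pvIsOne (c : List String × List String) : Bool := c.1.length == 1 && c.2.length == 1

def pvNE (c : List String × List String) : Bool := !(c.1.isEmpty && c.2.isEmpty)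

-- the occurrence index: name → list of indices of constraints whose left (resp. right) side mentions it
def pvBuildOcc (cons : List (List String × List String)) :
    PySem.Dict String (List Nat) × PySem.Dict String (List Nat) :=
  cons.zipIdx.foldl (fun d ci =>
    (ci.1.1.foldl (fun d x => d.modify x [] (· ++ [ci.2])) d.1,
     ci.1.2.foldl (fun d x => d.modify x [] (· ++ [ci.2])) d.2))
    (PySem.Dict.empty, PySem.Dict.empty)

def pvFilterL (x : String) (c : List String × List String) : List String × List String :=
  (c.1.filter (fun e => e != x), c.2)

def pvFilterR (x : String) (c : List String × List String) : List String × List String :=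
  (c.1, c.2.filter (fun e => e != x))

-- for x in names: for j in occ.get(x, []): cons[j] = upd(x, cons[j]); changed.add(j)
def pvRemoveLoop (occ : PySem.Dict String (List Nat))
    (upd : String → (List String × List String) → (List String × List String))
    (names : List String)
    (st : List (List String × List String) × PySem.Set Nat) :
    List (List String × List String) × PySem.Set Nat :=
  names.foldl (fun st x =>
    (occ.getD x []).foldl (fun st j =>
      (st.1.set j (upd x (st.1.getD j ([], []))), PySem.Set.add st.2 j)) st) st

def pvLoopB (locc rocc : PySem.Dict String (List Nat)) :
    Nat → List (List String × List String) → List Nat → PySem.Dict String String →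
    (List (List String × List String)) × PySem.Dict String String
  | 0, cons, _batch, sol => (cons, sol)
  | f + 1, cons, batch, sol =>
    if batch.isEmpty then (cons, sol)
    else
      let st := batch.foldl
        (fun (st : PySem.Dict String String × List String × List String) i =>
          let c := cons.getD i ([], [])
          (st.1.insert (c.1.headD "") (c.2.headD ""),
           st.2.1 ++ [c.1.headD ""], st.2.2 ++ [c.2.headD ""]))
        (sol, [], [])
      let st1 := pvRemoveLoop locc pvFilterL st.2.1 (cons, PySem.Set.empty)
      let st2 := pvRemoveLoop rocc pvFilterR st.2.2 st1
      let batch' := PySem.List.sorted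
        (st2.2.filter (fun j => pvIsOne (st2.1.getD j ([], [])))) (fun j => j) false
      pvLoopB locc rocc f st2.1 batch' st.1

def solve_renaming_alt (constraints : List (List String × List String)) :
    (List (List String × List String)) × (List (String × String)) :=
  let occ := pvBuildOcc constraints
  let batch := (List.range constraints.length).filter
    (fun i => pvIsOne (constraints.getD i ([], [])))
  let r := pvLoopB occ.1 occ.2 (pvTotalSize constraints + 1) constraints batch PySem.Dict.empty
  (r.1.filter pvNE, r.2.items)

-- ===== PRECONDITION & SPEC =====
def Spec_solve_renaming (constraints : List (List String × List String)) (out : (List (List String × List String)) × (List (String × String))) : Prop := out = solve_renaming_alt constraints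
instance (constraints : List (List String × List String)) (out : (List (List String × List String)) × (List (String × String))) : Decidable (Spec_solve_renaming constraints out) := by unfold Spec_solve_renaming; infer_instance

-- ===== CLAIM (what is proved, stated in full; the proofs are below) =====
def Claim_equal_solve_renaming : Prop := ∀ (constraints : List (List String × List String)), Dom_solve_renaming constraints → Spec_solve_renaming constraints (solve_renaming constraints)

-- ===== LEMMAS AND PROOFS =====

abbrev pvC : Type := List String × List String

def pvSF (L R : List String) (c : pvC) : pvC :=
  (c.1.filter (fun e => !(L.contains e)), c.2.filter (fun e => !(R.contains e)))

lemma pv_foldl_prod_split {α β γ : Type} (l : List γ) (f : α → γ → α) (g : β → γ → β)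
    (a : α) (b : β) :
    l.foldl (fun st x => (f st.1 x, g st.2 x)) (a, b) = (l.foldl f a, l.foldl g b) := by
  induction l generalizing a b with
  | nil => rfl
  | cons y t ih => simpa using ih (f a y) (g b y)

lemma pv_range_filter_map (xs : List pvC) (p : pvC → Bool) :
    ((List.range xs.length).filter (fun i => p (xs.getD i ([], [])))).map
      (fun i => xs.getD i ([], [])) = xs.filter p := by
  induction xs with
  | nil => rfl
  | cons c t ih =>
    have key : ∀ l : List Nat, List.map (fun i => (c :: t).getD i ([], [])) (List.map Nat.succ l)
        = List.map (fun i => t.getD i ([], [])) l := by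
      intro l; simp [List.map_map, Function.comp_def]
    simp only [List.length_cons, List.range_succ_eq_map, List.filter_cons,
      List.getD_cons_zero, List.filter_map]
    by_cases hp : p c = true
    · simp only [hp, if_pos, List.map_cons, List.getD_cons_zero]
      simp only [Function.comp_def, List.getD_cons_succ]
      rw [key]
      simpa [List.getD_eq_getElem?_getD] using ih
    · simp only [Bool.not_eq_true] at hp
      simp only [hp, Bool.false_eq_true, if_false]
      simp only [Function.comp_def, List.getD_cons_succ]
      rw [key]
      simpa [List.getD_eq_getElem?_getD] using ih

lemma pv_size_filter_le (xs : List pvC) (p : pvC → Bool) :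
    pvTotalSize (xs.filter p) ≤ pvTotalSize xs := by
  induction xs with
  | nil => simp [pvTotalSize]
  | cons c t ih =>
    simp only [List.filter_cons]
    by_cases h : p c = true <;> simp [h, pvTotalSize, List.sum_cons] at ih ⊢ <;> omega

lemma pv_size_cons (c : pvC) (t : List pvC) :
    pvTotalSize (c :: t) = c.1.length + c.2.length + pvTotalSize t := by
  simp [pvTotalSize]

lemma pv_size_map_le (xs : List pvC) (L R : List String) :
    pvTotalSize (xs.map (pvSF L R)) ≤ pvTotalSize xs := by
  induction xs with
  | nil => simp [pvTotalSize]
  | cons c t ih =>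
    rw [List.map_cons, pv_size_cons, pv_size_cons]
    have h1 : (pvSF L R c).1.length ≤ c.1.length :=
      List.length_filter_le (fun e => !(L.contains e)) c.1
    have h2 : (pvSF L R c).2.length ≤ c.2.length :=
      List.length_filter_le (fun e => !(R.contains e)) c.2
    omega

lemma pv_size_map_lt (cs : List pvC) (L R : List String) (c : pvC)
    (hc : c ∈ cs) (h1 : c.1.length = 1) (hL : c.1.headD "" ∈ L) :
    pvTotalSize (cs.map (pvSF L R)) < pvTotalSize cs := by
  induction cs with
  | nil => cases hc
  | cons a t ih =>
    rw [List.map_cons, pv_size_cons, pv_size_cons]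
    rcases List.mem_cons.mp hc with rfl | hct
    · obtain ⟨h, hh⟩ := List.length_eq_one_iff.mp h1
      have hb : (pvSF L R c).1.length = 0 := by
        show (List.filter (fun e => !(L.contains e)) c.1).length = 0
        simp [hh, List.filter_cons]
        simpa [hh] using hL
      have hle := pv_size_map_le t L R
      have h2 : (pvSF L R c).2.length ≤ c.2.length :=
        List.length_filter_le (fun e => !(R.contains e)) c.2
      omega
    · have hlt := ih hct
      have h2 : (pvSF L R a).2.length ≤ a.2.length :=
        List.length_filter_le (fun e => !(R.contains e)) a.2
      have h3 : (pvSF L R a).1.length ≤ a.1.length :=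
        List.length_filter_le (fun e => !(L.contains e)) a.1
      omega


lemma pv_scan_aux (ys : List pvC) (d : PySem.Dict String String)
    (s1 s2 : PySem.Set String) (b : Bool) :
    ys.foldl (fun st c => (st.1.insert (c.1.headD "") (c.2.headD ""),
        PySem.Set.add st.2.1 (c.1.headD ""), PySem.Set.add st.2.2.1 (c.2.headD ""), true))
      (d, s1, s2, b)
    = (ys.foldl (fun d c => d.insert (c.1.headD "") (c.2.headD "")) d,
       PySem.Set.update s1 (ys.map (fun c => c.1.headD "")),
       PySem.Set.update s2 (ys.map (fun c => c.2.headD "")),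
       b || !ys.isEmpty) := by
  induction ys generalizing d s1 s2 b with
  | nil => simp [PySem.Set.update]
  | cons c t ih =>
    simp only [List.foldl_cons, List.map_cons, List.isEmpty_cons]
    rw [ih]
    simp [PySem.Set.update]

lemma pv_scanA_eq (cs : List pvC) (sol : PySem.Dict String String) :
    pvScanA cs sol =
      ((cs.filter pvIsOne).foldl (fun d c => d.insert (c.1.headD "") (c.2.headD "")) sol,
       PySem.Set.ofList ((cs.filter pvIsOne).map (fun c => c.1.headD "")),
       PySem.Set.ofList ((cs.filter pvIsOne).map (fun c => c.2.headD "")),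
       !(cs.filter pvIsOne).isEmpty) := by
  have step1 : pvScanA cs sol = (cs.filter pvIsOne).foldl
      (fun st c => (st.1.insert (c.1.headD "") (c.2.headD ""),
        PySem.Set.add st.2.1 (c.1.headD ""), PySem.Set.add st.2.2.1 (c.2.headD ""), true))
      (sol, PySem.Set.empty, PySem.Set.empty, false) := by
    rw [pvScanA, List.foldl_filter]
    rfl
  rw [step1, pv_scan_aux]
  simp only [Bool.false_or]
  rfl

lemma pv_batch_aux (ys : List pvC) (d : PySem.Dict String String) (al ar : List String) :
    ys.foldl (fun st c => (st.1.insert (c.1.headD "") (c.2.headD ""),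
        st.2.1 ++ [c.1.headD ""], st.2.2 ++ [c.2.headD ""])) (d, al, ar)
    = (ys.foldl (fun d c => d.insert (c.1.headD "") (c.2.headD "")) d,
       al ++ ys.map (fun c => c.1.headD ""), ar ++ ys.map (fun c => c.2.headD "")) := by
  induction ys generalizing d al ar with
  | nil => simp
  | cons c t ih =>
    simp only [List.foldl_cons, List.map_cons]
    rw [ih]
    simp

lemma pv_batchfold (batch : List Nat) (cons : List pvC) (sol : PySem.Dict String String) :
    batch.foldl (fun (st : PySem.Dict String String × List String × List String) i =>
        let c := cons.getD i ([], [])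
        (st.1.insert (c.1.headD "") (c.2.headD ""),
         st.2.1 ++ [c.1.headD ""], st.2.2 ++ [c.2.headD ""])) (sol, [], [])
    = ((batch.map (fun i => cons.getD i ([], []))).foldl
         (fun d c => d.insert (c.1.headD "") (c.2.headD "")) sol,
       (batch.map (fun i => cons.getD i ([], []))).map (fun c => c.1.headD ""),
       (batch.map (fun i => cons.getD i ([], []))).map (fun c => c.2.headD "")) := by
  have h := pv_batch_aux (batch.map (fun i => cons.getD i ([], []))) sol [] []
  rw [List.foldl_map] at h
  simpa using h

lemma pv_removeLoop_split (occ : PySem.Dict String (List Nat))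
    (upd : String → pvC → pvC) (names : List String)
    (cons : List pvC) (s : PySem.Set Nat) :
    pvRemoveLoop occ upd names (cons, s) =
      (names.foldl (fun cs x => (occ.getD x []).foldl
          (fun cs j => cs.set j (upd x (cs.getD j ([], [])))) cs) cons,
       names.foldl (fun s x => (occ.getD x []).foldl PySem.Set.add s) s) := by
  unfold pvRemoveLoop
  induction names generalizing cons s with
  | nil => rfl
  | cons x t ih =>
    simp only [List.foldl_cons]
    rw [pv_foldl_prod_split (occ.getD x [])
      (fun cs j => cs.set j (upd x (cs.getD j ([], [])))) PySem.Set.add cons s]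
    exact ih _ _

lemma pv_lenfold_inner (js : List Nat) (cs : List pvC) (F : List pvC → Nat → pvC) :
    (js.foldl (fun cs j => cs.set j (F cs j)) cs).length = cs.length := by
  induction js generalizing cs with
  | nil => rfl
  | cons j t ih => simp [ih, List.length_set]

lemma pv_inner_getD (upd : pvC → pvC) (hid : ∀ c, upd (upd c) = upd c)
    (js : List Nat) (cs : List pvC) (j : Nat) :
    (js.foldl (fun cs j' => cs.set j' (upd (cs.getD j' ([], [])))) cs).getD j ([], []) =
      if j ∈ js ∧ j < cs.length then upd (cs.getD j ([], [])) else cs.getD j ([], []) := by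
  induction js generalizing cs with
  | nil => simp
  | cons j' t ih =>
    simp only [List.foldl_cons]
    rw [ih]
    have hlen : (cs.set j' (upd (cs.getD j' ([], [])))).length = cs.length := List.length_set
    by_cases hj : j < cs.length
    · have hget : (cs.set j' (upd (cs.getD j' ([], [])))).getD j ([], []) =
          if j' = j then upd (cs.getD j ([], [])) else cs.getD j ([], []) := by
        rw [List.getD_eq_getElem _ _ (hlen ▸ hj), List.getElem_set]
        split_ifs with h
        · subst h; rw [List.getD_eq_getElem _ _ hj]
        · rw [List.getD_eq_getElem _ _ hj]
      rw [hlen, hget]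
      have hjj2 : ∀ (h : ¬ j' = j), ¬ j = j' := fun h hh => h hh.symm
      by_cases hmem : j ∈ t <;> by_cases hjj : j' = j <;>
        simp [hmem, hjj, hjj2, hj, hid, List.mem_cons, Or.comm]
    · rw [hlen]
      have h1 : (cs.set j' (upd (cs.getD j' ([], [])))).getD j ([], []) = ([], []) :=
        List.getD_eq_default _ _ (by omega)
      have h2 : cs.getD j ([], []) = ([], []) := List.getD_eq_default _ _ (by omega)
      simp [hj, h1, h2]

lemma pv_filterL_idem (x : String) : ∀ c : pvC, pvFilterL x (pvFilterL x c) = pvFilterL x c := by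
  intro c; simp [pvFilterL, List.filter_filter]

lemma pv_filterR_idem (x : String) : ∀ c : pvC, pvFilterR x (pvFilterR x c) = pvFilterR x c := by
  intro c; simp [pvFilterR, List.filter_filter]

lemma pv_outer_left (locc : PySem.Dict String (List Nat)) (names : List String)
    (cons : List pvC)
    (hsup : ∀ j x, x ∈ (cons.getD j ([], [])).1 → j ∈ locc.getD x []) (j : Nat) :
    (names.foldl (fun cs x => (locc.getD x []).foldl
        (fun cs j' => cs.set j' (pvFilterL x (cs.getD j' ([], [])))) cs) cons).getD j ([], []) =
      ((cons.getD j ([], [])).1.filter (fun e => !(names.contains e)), (cons.getD j ([], [])).2) := by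
  induction names generalizing cons with
  | nil => simp
  | cons x T ih =>
    simp only [List.foldl_cons]
    have hchar : ∀ j, ((locc.getD x []).foldl
        (fun cs j' => cs.set j' (pvFilterL x (cs.getD j' ([], [])))) cons).getD j ([], []) =
        ((cons.getD j ([], [])).1.filter (fun e => e != x), (cons.getD j ([], [])).2) := by
      intro j
      rw [pv_inner_getD (pvFilterL x) (pv_filterL_idem x)]
      split_ifs with h
      · rfl
      · by_cases hx : x ∈ (cons.getD j ([], [])).1
        · have hj : j < cons.length := by
            by_contra hj
            rw [List.getD_eq_default _ _ (Nat.le_of_not_lt hj)] at hx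
            simp at hx
          exact absurd ⟨hsup j x hx, hj⟩ h
        · have : (cons.getD j ([], [])).1.filter (fun e => e != x) = (cons.getD j ([], [])).1 := by
            apply List.filter_eq_self.mpr
            intro a ha
            simp only [bne_iff_ne, ne_eq]
            exact fun hax => hx (hax ▸ ha)
          rw [this]
    rw [ih]
    · rw [hchar j]
      simp only [List.filter_filter]
      congr 1
      apply List.filter_congr
      intro a _
      simp [Bool.and_comm]
      tauto
    · intro j' x' hx'
      rw [hchar j'] at hx'
      exact hsup j' x' (List.mem_of_mem_filter hx')

lemma pv_outer_right (rocc : PySem.Dict String (List Nat)) (names : List String)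
    (cons : List pvC)
    (hsup : ∀ j x, x ∈ (cons.getD j ([], [])).2 → j ∈ rocc.getD x []) (j : Nat) :
    (names.foldl (fun cs x => (rocc.getD x []).foldl
        (fun cs j' => cs.set j' (pvFilterR x (cs.getD j' ([], [])))) cs) cons).getD j ([], []) =
      ((cons.getD j ([], [])).1, (cons.getD j ([], [])).2.filter (fun e => !(names.contains e))) := by
  induction names generalizing cons with
  | nil => simp
  | cons x T ih =>
    simp only [List.foldl_cons]
    have hchar : ∀ j, ((rocc.getD x []).foldl
        (fun cs j' => cs.set j' (pvFilterR x (cs.getD j' ([], [])))) cons).getD j ([], []) =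
        ((cons.getD j ([], [])).1, (cons.getD j ([], [])).2.filter (fun e => e != x)) := by
      intro j
      rw [pv_inner_getD (pvFilterR x) (pv_filterR_idem x)]
      split_ifs with h
      · rfl
      · by_cases hx : x ∈ (cons.getD j ([], [])).2
        · have hj : j < cons.length := by
            by_contra hj
            rw [List.getD_eq_default _ _ (Nat.le_of_not_lt hj)] at hx
            simp at hx
          exact absurd ⟨hsup j x hx, hj⟩ h
        · have : (cons.getD j ([], [])).2.filter (fun e => e != x) = (cons.getD j ([], [])).2 := by
            apply List.filter_eq_self.mpr
            intro a ha
            simp only [bne_iff_ne, ne_eq]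
            exact fun hax => hx (hax ▸ ha)
          rw [this]
    rw [ih]
    · rw [hchar j]
      simp only [List.filter_filter]
      congr 1
      apply List.filter_congr
      intro a _
      simp [Bool.and_comm]
      tauto
    · intro j' x' hx'
      rw [hchar j'] at hx'
      exact hsup j' x' (List.mem_of_mem_filter hx')

lemma pv_lenfold_outer (occ : PySem.Dict String (List Nat)) (upd : String → pvC → pvC)
    (names : List String) (cons : List pvC) :
    (names.foldl (fun cs x => (occ.getD x []).foldl
        (fun cs j' => cs.set j' (upd x (cs.getD j' ([], [])))) cs) cons).length = cons.length := by
  induction names generalizing cons with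
  | nil => rfl
  | cons x T ih =>
    simp only [List.foldl_cons]
    rw [ih, pv_lenfold_inner]

lemma pv_mem_addfold (js : List Nat) (s : PySem.Set Nat) (j : Nat) :
    j ∈ js.foldl PySem.Set.add s ↔ j ∈ s ∨ j ∈ js := by
  induction js generalizing s with
  | nil => simp
  | cons j' t ih =>
    simp only [List.foldl_cons, ih, PySem.Set.mem_add, List.mem_cons]
    tauto

lemma pv_nodup_addfold (js : List Nat) (s : PySem.Set Nat) (h : s.Nodup) :
    (js.foldl PySem.Set.add s).Nodup := by
  induction js generalizing s with
  | nil => exact h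
  | cons j' t ih => exact ih _ (PySem.Set.nodup_add s j' h)

lemma pv_mem_setfold (occ : PySem.Dict String (List Nat)) (names : List String)
    (s : PySem.Set Nat) (j : Nat) :
    j ∈ names.foldl (fun s x => (occ.getD x []).foldl PySem.Set.add s) s ↔
      j ∈ s ∨ ∃ x ∈ names, j ∈ occ.getD x [] := by
  induction names generalizing s with
  | nil => simp
  | cons x T ih =>
    simp only [List.foldl_cons, ih, pv_mem_addfold, List.mem_cons]
    constructor
    · rintro ((h | h) | ⟨y, hy, hjy⟩)
      · exact Or.inl h
      · exact Or.inr ⟨x, Or.inl rfl, h⟩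
      · exact Or.inr ⟨y, Or.inr hy, hjy⟩
    · rintro (h | ⟨y, (rfl | hy), hjy⟩)
      · exact Or.inl (Or.inl h)
      · exact Or.inl (Or.inr hjy)
      · exact Or.inr ⟨y, hy, hjy⟩

lemma pv_nodup_setfold (occ : PySem.Dict String (List Nat)) (names : List String)
    (s : PySem.Set Nat) (h : s.Nodup) :
    (names.foldl (fun s x => (occ.getD x []).foldl PySem.Set.add s) s).Nodup := by
  induction names generalizing s with
  | nil => exact h
  | cons x T ih => exact ih _ (pv_nodup_addfold _ _ h)

lemma pv_sorted_batch (changed : PySem.Set Nat) (n : Nat) (pred : Nat → Bool)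
    (hnd : changed.Nodup) (hlt : ∀ j ∈ changed, j < n)
    (hcov : ∀ j, j < n → pred j = true → j ∈ changed) :
    PySem.List.sorted (changed.filter pred) (fun j => j) false =
      (List.range n).filter pred := by
  apply PySem.List.sorted_id_eq_of_perm_of_pairwise
  · rw [List.perm_ext_iff_of_nodup (List.Nodup.filter _ (List.nodup_range)) (List.Nodup.filter _ hnd)]
    intro j
    simp only [List.mem_filter, List.mem_range]
    constructor
    · rintro ⟨hj, hp⟩
      exact ⟨hcov j hj hp, hp⟩
    · rintro ⟨hj, hp⟩
      exact ⟨hlt j hj, hp⟩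
  · exact List.Pairwise.filter _ (List.pairwise_le_range)

lemma pv_buildOcc_split (cons : List pvC) :
    pvBuildOcc cons =
      (cons.zipIdx.foldl (fun d ci =>
          ci.1.1.foldl (fun d x => d.modify x [] (· ++ [ci.2])) d) PySem.Dict.empty,
       cons.zipIdx.foldl (fun d ci =>
          ci.1.2.foldl (fun d x => d.modify x [] (· ++ [ci.2])) d) PySem.Dict.empty) := by
  unfold pvBuildOcc
  exact pv_foldl_prod_split cons.zipIdx
    (fun d ci => ci.1.1.foldl (fun d x => d.modify x [] (· ++ [ci.2])) d)
    (fun d ci => ci.1.2.foldl (fun d x => d.modify x [] (· ++ [ci.2])) d)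
    PySem.Dict.empty PySem.Dict.empty

lemma pv_occ_getD (cons : List pvC) (side : pvC → List String) (x : String) :
    (cons.zipIdx.foldl (fun d ci =>
        (side ci.1).foldl (fun d x => d.modify x [] (· ++ [ci.2])) d) PySem.Dict.empty).getD x []
    = ((cons.zipIdx.flatMap (fun ci => (side ci.1).map (fun y => (y, ci.2)))).filter
        (fun p => p.1 == x)).map (fun p => p.2) := by
  have hmap : ∀ (ci : pvC × Nat) (d : PySem.Dict String (List Nat)),
      (side ci.1).foldl (fun d x => d.modify x [] (· ++ [ci.2])) d =
      ((side ci.1).map (fun y => (y, ci.2))).foldl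
        (fun d p => d.modify p.1 [] (· ++ [p.2])) d := by
    intro ci d
    rw [List.foldl_map]
  have hfun : (fun (d : PySem.Dict String (List Nat)) (ci : pvC × Nat) =>
        (side ci.1).foldl (fun d x => d.modify x [] (· ++ [ci.2])) d) =
      (fun d ci => ((side ci.1).map (fun y => (y, ci.2))).foldl
        (fun d p => d.modify p.1 [] (· ++ [p.2])) d) := by
    funext d ci
    exact hmap ci d
  have : cons.zipIdx.foldl (fun d ci =>
        (side ci.1).foldl (fun d x => d.modify x [] (· ++ [ci.2])) d) PySem.Dict.empty =
      (cons.zipIdx.flatMap (fun ci => (side ci.1).map (fun y => (y, ci.2)))).foldl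
        (fun d p => d.modify p.1 [] (· ++ [p.2])) PySem.Dict.empty := by
    rw [hfun, List.foldl_flatMap]
  rw [this, PySem.Dict.getD_foldl_modify_append]
  simp

lemma pv_occ_mem (cons : List pvC) (side : pvC → List String) (x : String) (j : Nat) :
    j ∈ (cons.zipIdx.foldl (fun d ci =>
        (side ci.1).foldl (fun d x => d.modify x [] (· ++ [ci.2])) d) PySem.Dict.empty).getD x []
    ↔ j < cons.length ∧ x ∈ side (cons.getD j ([], [])) := by
  rw [pv_occ_getD]
  simp only [List.mem_map, List.mem_filter, List.mem_flatMap, List.mem_zipIdx_iff_getElem?]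
  constructor
  · rintro ⟨p, ⟨⟨ci, hci, hp⟩, hx⟩, rfl⟩
    obtain ⟨y, hy, hyp⟩ := hp
    subst hyp
    simp only [beq_iff_eq] at hx
    subst hx
    have hj : ci.2 < cons.length := by
      by_contra hc
      rw [List.getElem?_eq_none (by omega)] at hci
      cases hci
    have hget : cons.getD ci.2 ([], []) = ci.1 := by
      rw [List.getD_eq_getElem _ _ hj]
      rwa [List.getElem?_eq_getElem hj, Option.some_inj] at hci
    exact ⟨hj, hget ▸ hy⟩
  · rintro ⟨hj, hx⟩
    refine ⟨(x, j), ⟨⟨(cons.getD j ([], []), j), ?_, ⟨x, hx, rfl⟩⟩, by simp⟩, rfl⟩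
    rw [List.getElem?_eq_getElem hj, List.getD_eq_getElem _ _ hj]

lemma pv_ne_false (c : pvC) (h : pvNE c = false) : c = ([], []) := by
  simp [pvNE] at h
  exact Prod.ext h.1 h.2

lemma pv_isOne_ne (c : pvC) (h : pvIsOne c = true) : pvNE c = true := by
  simp [pvIsOne] at h
  simp [pvNE]
  exact Or.inl fun h1 => by simp [h1] at h

lemma pv_removeFrom_aux (cs : List pvC) (lefts rights : PySem.Set String) (acc : List pvC) :
    cs.foldl (fun acc c =>
      let nl := c.1.filter (fun l => !(lefts.contains l))
      let nr := c.2.filter (fun r => !(rights.contains r))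
      if nl.isEmpty && nr.isEmpty then acc else acc ++ [(nl, nr)]) acc =
    acc ++ (cs.map (fun c => (c.1.filter (fun l => !(lefts.contains l)),
      c.2.filter (fun r => !(rights.contains r))))).filter pvNE := by
  induction cs generalizing acc with
  | nil => simp
  | cons c t ih =>
    simp only [List.foldl_cons, List.map_cons, List.filter_cons]
    by_cases h : ((c.1.filter (fun l => !(lefts.contains l))).isEmpty &&
        (c.2.filter (fun r => !(rights.contains r))).isEmpty) = true
    · have hne : pvNE (c.1.filter (fun l => !(lefts.contains l)),
          c.2.filter (fun r => !(rights.contains r))) = false := by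
        simp [pvNE] at h ⊢
        exact h
      simp only [h, if_true, hne]
      rw [ih]
      simp
    · have hne : pvNE (c.1.filter (fun l => !(lefts.contains l)),
          c.2.filter (fun r => !(rights.contains r))) = true := by
        simp [pvNE] at h ⊢
        by_cases hc : ∀ a ∈ c.1, a ∈ lefts
        · exact Or.inr (h hc)
        · push Not at hc
          exact Or.inl hc
      simp only [Bool.not_eq_true] at h
      simp only [h, Bool.false_eq_true, if_false, hne, if_true]
      rw [ih]
      simp

lemma pv_removeFrom_eq (cs : List pvC) (lefts rights : PySem.Set String) :
    pvRemoveFromConstraints cs lefts rights =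
      (cs.map (fun c => (c.1.filter (fun l => !(lefts.contains l)),
        c.2.filter (fun r => !(rights.contains r))))).filter pvNE := by
  unfold pvRemoveFromConstraints
  simpa using pv_removeFrom_aux cs lefts rights []

lemma pv_contains_ofList (L : List String) (e : String) :
    (PySem.Set.ofList L).contains e = L.contains e := by
  by_cases h : e ∈ L
  · have h2 : e ∈ PySem.Set.ofList L := (PySem.Set.mem_ofList L e).mpr h
    simp [h, h2]
  · have h2 : e ∉ PySem.Set.ofList L := fun hc => h ((PySem.Set.mem_ofList L e).mp hc)
    simp [h, h2]

lemma pv_filter_isOne_eq_of_ne (cs cons : List pvC) (h : cs.filter pvNE = cons.filter pvNE) :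
    cs.filter pvIsOne = cons.filter pvIsOne := by
  have key : ∀ xs : List pvC, xs.filter pvIsOne = (xs.filter pvNE).filter pvIsOne := by
    intro xs
    rw [List.filter_filter]
    apply List.filter_congr
    intro a _
    by_cases ha : pvIsOne a = true
    · simp [ha, pv_isOne_ne a ha]
    · simp only [Bool.not_eq_true] at ha
      simp [ha]
  rw [key cs, key cons, h]

lemma pv_map_filter_ne (f : pvC → pvC) (hf : f ([], []) = ([], [])) (xs : List pvC) :
    (xs.map f).filter pvNE = ((xs.filter pvNE).map f).filter pvNE := by
  induction xs with
  | nil => rfl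
  | cons c t ih =>
    simp only [List.map_cons, List.filter_cons]
    by_cases h : pvNE c = true
    · simp only [h, if_true, List.map_cons, List.filter_cons]
      rw [ih]
    · simp only [Bool.not_eq_true] at h
      have hc : c = ([], []) := pv_ne_false c h
      have : pvNE (f c) = false := by rw [hc, hf]; rfl
      simp only [h, Bool.false_eq_true, if_false, this, ih]

theorem pv_main (f : Nat) : ∀ (locc rocc : PySem.Dict String (List Nat))
    (cs cons : List pvC) (batch : List Nat) (sol : PySem.Dict String String),
    cs.filter pvNE = cons.filter pvNE →
    batch = (List.range cons.length).filter (fun i => pvIsOne (cons.getD i ([], []))) →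
    (∀ j x, x ∈ (cons.getD j ([], [])).1 → j ∈ locc.getD x []) →
    (∀ j x, x ∈ (cons.getD j ([], [])).2 → j ∈ rocc.getD x []) →
    (∀ x j, j ∈ locc.getD x [] → j < cons.length) →
    (∀ x j, j ∈ rocc.getD x [] → j < cons.length) →
    pvTotalSize cs < f →
    pvLoopA f cs sol =
      ((pvLoopB locc rocc f cons batch sol).1.filter pvNE,
       (pvLoopB locc rocc f cons batch sol).2) := by
  induction f with
  | zero => intro _ _ cs _ _ _ _ _ _ _ _ _ hf; exact absurd hf (by omega)
  | succ f ih =>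
    intro locc rocc cs cons batch sol h1 h2 h3 h4 h5 h6 hf
    by_cases hb : batch = []
    · have hfilt : cons.filter pvIsOne = [] := by
        have hm := pv_range_filter_map cons pvIsOne
        rw [← h2, hb] at hm
        exact hm.symm
      have hcs : cs.filter pvIsOne = [] := by
        rw [pv_filter_isOne_eq_of_ne cs cons h1, hfilt]
      have hA : pvLoopA (f + 1) cs sol = (cs.filter pvNE, sol) := by
        simp only [pvLoopA, pv_scanA_eq, hcs]
        simp only [List.isEmpty_nil, Bool.not_true, Bool.false_eq_true, if_false,
          List.map_nil, List.foldl_nil]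
        rw [pv_removeFrom_eq]
        have : (fun c : pvC => (c.1.filter (fun l => !((PySem.Set.ofList ([] : List String)).contains l)),
            c.2.filter (fun r => !((PySem.Set.ofList ([] : List String)).contains r)))) = fun c => c := by
          funext c
          simp
        rw [this, List.map_id']
      have hB : pvLoopB locc rocc (f + 1) cons batch sol = (cons, sol) := by
        simp [pvLoopB, hb]
      rw [hA, hB, h1]
    · -- batch nonempty: one full round on each side, then the induction hypothesis
      have hys : batch.map (fun i => cons.getD i ([], [])) = cons.filter pvIsOne := by
        rw [h2]; exact pv_range_filter_map cons pvIsOne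
      have hiso : cs.filter pvIsOne = cons.filter pvIsOne :=
        pv_filter_isOne_eq_of_ne cs cons h1
      have hPne : cons.filter pvIsOne ≠ [] := by
        intro h0
        rw [h0] at hys
        exact hb (List.map_eq_nil_iff.mp hys)
      -- names and the round's products
      set P := cons.filter pvIsOne with hP
      set L := P.map (fun c => c.1.headD "") with hLdef
      set R := P.map (fun c => c.2.headD "") with hRdef
      set sol' := P.foldl (fun d c => d.insert (c.1.headD "") (c.2.headD "")) sol with hsol'
      -- A's round
      have hA : pvLoopA (f + 1) cs sol =
          pvLoopA f ((cs.map (pvSF L R)).filter pvNE) sol' := by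
        simp only [pvLoopA, pv_scanA_eq, hiso, ← hLdef, ← hRdef, ← hsol']
        have hch : (!P.isEmpty) = true := by
          simp [List.isEmpty_iff, hPne]
        simp only [hch, if_true]
        congr 1
        rw [pv_removeFrom_eq]
        have : (fun c : pvC => (c.1.filter (fun l => !((PySem.Set.ofList L).contains l)),
            c.2.filter (fun r => !((PySem.Set.ofList R).contains r)))) = pvSF L R := by
          funext c
          simp [pvSF, pv_contains_ofList]
        rw [this]
      -- B's round
      set consL := L.foldl (fun cs x => (locc.getD x []).foldl
        (fun cs j' => cs.set j' (pvFilterL x (cs.getD j' ([], [])))) cs) cons with hconsL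
      set cons2 := R.foldl (fun cs x => (rocc.getD x []).foldl
        (fun cs j' => cs.set j' (pvFilterR x (cs.getD j' ([], [])))) cs) consL with hcons2
      set chg1 := L.foldl (fun s x => (locc.getD x []).foldl PySem.Set.add s)
        (PySem.Set.empty : PySem.Set Nat) with hchg1
      set chg2 := R.foldl (fun s x => (rocc.getD x []).foldl PySem.Set.add s) chg1 with hchg2
      set batch' := PySem.List.sorted
        (chg2.filter (fun j => pvIsOne (cons2.getD j ([], [])))) (fun j => j) false with hbatch'
      have hB : pvLoopB locc rocc (f + 1) cons batch sol =
          pvLoopB locc rocc f cons2 batch' sol' := by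
        have hbne : batch.isEmpty = false := by
          simp [List.isEmpty_iff, hb]
        simp only [pvLoopB, hbne, Bool.false_eq_true, if_false]
        rw [pv_batchfold, hys]
        dsimp only
        rw [pv_removeLoop_split locc pvFilterL _ cons PySem.Set.empty]
        rw [pv_removeLoop_split rocc pvFilterR _ _ _]
      -- pointwise characterization of cons2 (the updated constraint array)
      have hgetL : ∀ j, consL.getD j ([], []) =
          ((cons.getD j ([], [])).1.filter (fun e => !(L.contains e)), (cons.getD j ([], [])).2) := by
        intro j
        rw [hconsL]
        exact pv_outer_left locc L cons h3 j
      have hsupR' : ∀ j x, x ∈ (consL.getD j ([], [])).2 → j ∈ rocc.getD x [] := by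
        intro j x hx
        rw [hgetL j] at hx
        exact h4 j x hx
      have hget2 : ∀ j, cons2.getD j ([], []) = pvSF L R (cons.getD j ([], [])) := by
        intro j
        rw [hcons2, pv_outer_right rocc R consL hsupR' j, hgetL j]
        rfl
      have hlenL : consL.length = cons.length := by
        rw [hconsL]; exact pv_lenfold_outer locc pvFilterL L cons
      have hlen2 : cons2.length = cons.length := by
        rw [hcons2, pv_lenfold_outer rocc pvFilterR R consL]; exact hlenL
      have hconsmap : cons2 = cons.map (pvSF L R) := by
        apply List.ext_getElem (by simp [hlen2])
        intro i h1i h2i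
        have h3i : i < cons.length := by rw [← hlen2]; exact h1i
        calc cons2[i] = cons2.getD i ([], []) := (List.getD_eq_getElem _ _ h1i).symm
          _ = pvSF L R (cons.getD i ([], [])) := hget2 i
          _ = pvSF L R cons[i] := by rw [List.getD_eq_getElem _ _ h3i]
          _ = (cons.map (pvSF L R))[i] := by simp
      -- the changed set
      have hmem2 : ∀ j, j ∈ chg2 ↔
          (∃ x ∈ L, j ∈ locc.getD x []) ∨ (∃ x ∈ R, j ∈ rocc.getD x []) := by
        intro j
        rw [hchg2, pv_mem_setfold, hchg1, pv_mem_setfold]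
        simp only [PySem.Set.empty]
        simp
      have hnd2 : chg2.Nodup :=
        pv_nodup_setfold _ _ _ (pv_nodup_setfold _ _ _ List.nodup_nil)
      have hlt2 : ∀ j ∈ chg2, j < cons.length := by
        intro j hj
        rcases (hmem2 j).mp hj with ⟨x, _, hx⟩ | ⟨x, _, hx⟩
        · exact h5 x j hx
        · exact h6 x j hx
      have hcov : ∀ j, j < cons.length → pvIsOne (cons2.getD j ([], [])) = true → j ∈ chg2 := by
        intro j hj hone
        by_contra hnc
        rw [hmem2] at hnc
        push Not at hnc
        obtain ⟨hncL, hncR⟩ := hnc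
        have hid1 : (cons.getD j ([], [])).1.filter (fun e => !(L.contains e)) =
            (cons.getD j ([], [])).1 := by
          apply List.filter_eq_self.mpr
          intro a ha
          by_cases haL : a ∈ L
          · exact absurd (h3 j a ha) (hncL a haL)
          · simp [haL]
        have hid2 : (cons.getD j ([], [])).2.filter (fun e => !(R.contains e)) =
            (cons.getD j ([], [])).2 := by
          apply List.filter_eq_self.mpr
          intro a ha
          by_cases haR : a ∈ R
          · exact absurd (h4 j a ha) (hncR a haR)
          · simp [haR]
        have hsame : cons2.getD j ([], []) = cons.getD j ([], []) := by
          rw [hget2 j]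
          show ((cons.getD j ([], [])).1.filter (fun e => !(L.contains e)),
              (cons.getD j ([], [])).2.filter (fun e => !(R.contains e))) = _
          rw [hid1, hid2]
        rw [hsame] at hone
        have hcP : cons.getD j ([], []) ∈ P := by
          rw [hP]
          refine List.mem_filter.mpr ⟨?_, hone⟩
          rw [List.getD_eq_getElem _ _ hj]
          exact List.getElem_mem _
        have hhead : (cons.getD j ([], [])).1.headD "" ∈ L := by
          rw [hLdef]
          exact List.mem_map.mpr ⟨_, hcP, rfl⟩
        have hmem1 : (cons.getD j ([], [])).1.headD "" ∈ (cons.getD j ([], [])).1 := by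
          have hone' := hone
          simp only [pvIsOne, Bool.and_eq_true, beq_iff_eq] at hone'
          obtain ⟨a, ha⟩ := List.length_eq_one_iff.mp hone'.1
          rw [ha]
          simp
        exact (hncL _ hhead) (h3 j _ hmem1)
      have hbatch'' : batch' = (List.range cons2.length).filter
          (fun i => pvIsOne (cons2.getD i ([], []))) := by
        rw [hbatch', hlen2]
        exact pv_sorted_batch chg2 cons.length _ hnd2 hlt2 hcov
      -- the re-established invariants
      have h1' : ((cs.map (pvSF L R)).filter pvNE).filter pvNE = cons2.filter pvNE := by
        have hidem : ∀ xs : List pvC, (xs.filter pvNE).filter pvNE = xs.filter pvNE := by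
          intro xs
          rw [List.filter_filter]
          apply List.filter_congr
          intro a _
          cases pvNE a <;> simp
        have hf0 : pvSF L R ([], []) = ([], []) := by simp [pvSF]
        rw [hidem, hconsmap, pv_map_filter_ne _ hf0 cs, h1, ← pv_map_filter_ne _ hf0 cons]
      have h3' : ∀ j x, x ∈ (cons2.getD j ([], [])).1 → j ∈ locc.getD x [] := by
        intro j x hx
        rw [hget2 j] at hx
        exact h3 j x (List.mem_of_mem_filter hx)
      have h4' : ∀ j x, x ∈ (cons2.getD j ([], [])).2 → j ∈ rocc.getD x [] := by
        intro j x hx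
        rw [hget2 j] at hx
        exact h4 j x (List.mem_of_mem_filter hx)
      have h5' : ∀ x j, j ∈ locc.getD x [] → j < cons2.length := by
        intro x j hj
        rw [hlen2]
        exact h5 x j hj
      have h6' : ∀ x j, j ∈ rocc.getD x [] → j < cons2.length := by
        intro x j hj
        rw [hlen2]
        exact h6 x j hj
      have hf' : pvTotalSize ((cs.map (pvSF L R)).filter pvNE) < f := by
        obtain ⟨c, hcmem⟩ : ∃ c, c ∈ cs.filter pvIsOne := by
          apply List.exists_mem_of_ne_nil
          rw [hiso]
          exact hPne
        have hcone : pvIsOne c = true := (List.mem_filter.mp hcmem).2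
        have hcsmem : c ∈ cs := List.mem_of_mem_filter hcmem
        have hchead : c.1.headD "" ∈ L := by
          rw [hLdef]
          exact List.mem_map.mpr ⟨c, hiso ▸ hcmem, rfl⟩
        have h1len : c.1.length = 1 := by
          simp [pvIsOne] at hcone
          exact hcone.1
        have hlt := pv_size_map_lt cs L R c hcsmem h1len hchead
        have hle := pv_size_filter_le (cs.map (pvSF L R)) pvNE
        omega
      rw [hA, hB]
      exact ih locc rocc _ cons2 batch' sol' h1' hbatch'' h3' h4' h5' h6' hf'

theorem pv_solve_eq (constraints : List pvC) :
    solve_renaming constraints = solve_renaming_alt constraints := by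
  have hsplit := pv_buildOcc_split constraints
  have h3 : ∀ j x, x ∈ (constraints.getD j ([], [])).1 →
      j ∈ (pvBuildOcc constraints).1.getD x [] := by
    intro j x hx
    have hj : j < constraints.length := by
      by_contra hc
      rw [List.getD_eq_default _ _ (Nat.le_of_not_lt hc)] at hx
      simp at hx
    rw [hsplit]
    exact (pv_occ_mem constraints (fun c => c.1) x j).mpr ⟨hj, hx⟩
  have h4 : ∀ j x, x ∈ (constraints.getD j ([], [])).2 →
      j ∈ (pvBuildOcc constraints).2.getD x [] := by
    intro j x hx
    have hj : j < constraints.length := by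
      by_contra hc
      rw [List.getD_eq_default _ _ (Nat.le_of_not_lt hc)] at hx
      simp at hx
    rw [hsplit]
    exact (pv_occ_mem constraints (fun c => c.2) x j).mpr ⟨hj, hx⟩
  have h5 : ∀ x j, j ∈ (pvBuildOcc constraints).1.getD x [] → j < constraints.length := by
    intro x j hj
    rw [hsplit] at hj
    exact ((pv_occ_mem constraints (fun c => c.1) x j).mp hj).1
  have h6 : ∀ x j, j ∈ (pvBuildOcc constraints).2.getD x [] → j < constraints.length := by
    intro x j hj
    rw [hsplit] at hj
    exact ((pv_occ_mem constraints (fun c => c.2) x j).mp hj).1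
  have main := pv_main (pvTotalSize constraints + 1) (pvBuildOcc constraints).1
    (pvBuildOcc constraints).2 constraints constraints
    ((List.range constraints.length).filter (fun i => pvIsOne (constraints.getD i ([], []))))
    PySem.Dict.empty rfl rfl h3 h4 h5 h6 (by omega)
  unfold solve_renaming solve_renaming_alt
  rw [main]

-- ===== VERDICT (by name: the statement is the Claim_ definition above) =====
theorem solve_renaming_spec : Claim_equal_solve_renaming := by
  intro constraints _
  unfold Spec_solve_renaming
  exact pv_solve_eq constraints
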